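-- pv_equiv track=rewrite | github.com/aOriginalUsernam/orbital_scan | orbital_scan.py | calc_highest_terain
-- ===== SOURCE A (Python) =====
-- def calc_highest_terain(data_2D_format: list[list[bool]]) -> int:
--     row_nr = -1
--     for row in data_2D_format:
--         row_nr += 1
--         column_nr = -1
--         for column in row:
--             column_nr += 1
--             if column:
--                 if check_if_highest(data_2D_format, row_nr, column_nr):
--                     return len(data_2D_format) - row_nr
--     return -1
--
-- def check_if_highest(
--     data_2D_format: list[list[bool]], row_id: int, column_id: int
-- ) -> bool:
--     if row_id + 1 == len(data_2D_format):
--         return True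
--     elif not data_2D_format[row_id + 1][column_id]:
--         return False
--     return check_if_highest(data_2D_format, row_id + 1, column_id)
-- ===== SOURCE B (Python) =====
-- def calc_highest_terain(data_2D_format: list[list[bool]]) -> int:
--     rows = len(data_2D_format)
--     if rows == 0:
--         return -1
--     best = None
--     for column_nr in range(len(data_2D_format[-1])):
--         row_nr = rows
--         while (
--             row_nr > 0
--             and column_nr < len(data_2D_format[row_nr - 1])
--             and data_2D_format[row_nr - 1][column_nr]
--         ):
--             row_nr -= 1
--         if row_nr < rows and (best is None or row_nr < best):
--             best = row_nr
--     return rows - best if best is not None else -1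
-- ===== Notes on version B (the rewrite author's own statement) =====
-- stated objective: faster
-- what changed: A scans cells row-major and re-walks the whole column below each True cell via recursion; B makes one bottom-up pass per column to find the start of the bottom-anchored True run and returns the height of the minimal such start row.
import Mathlib
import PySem

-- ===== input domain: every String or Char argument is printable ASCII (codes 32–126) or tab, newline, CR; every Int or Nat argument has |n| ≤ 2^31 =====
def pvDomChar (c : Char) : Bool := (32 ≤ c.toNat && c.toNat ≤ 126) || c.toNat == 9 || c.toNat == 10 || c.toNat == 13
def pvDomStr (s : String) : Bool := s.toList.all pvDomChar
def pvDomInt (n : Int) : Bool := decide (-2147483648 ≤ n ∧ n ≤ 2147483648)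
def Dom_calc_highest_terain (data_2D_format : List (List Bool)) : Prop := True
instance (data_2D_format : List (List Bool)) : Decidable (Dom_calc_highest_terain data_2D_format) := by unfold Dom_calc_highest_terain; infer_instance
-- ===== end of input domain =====

-- B replaces A's per-cell recursive downward check (O(R^2*C)) by one bottom-up pass per
-- column finding the start of the bottom-anchored True run (O(R*C)); same return value
-- on every input where A returns (Pre_ excludes exactly A's IndexError inputs).

-- pvCell d r j = data_2D_format[r][j], with false for an out-of-range index
-- (Python A raises IndexError there — those inputs are excluded by Pre_;
--  Python B explicitly tests the bound, so for B this is exact).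
def pvCell (d : List (List Bool)) (r j : Nat) : Bool := (d.getD r []).getD j false

-- ===== PORT A =====
-- check_if_highest: walks down the column from row r; out-of-range column index
-- yields false here where Python raises (excluded by Pre_).
def checkA (d : List (List Bool)) (r j : Nat) : Bool :=
  if _h : r + 1 < d.length then
    if pvCell d (r + 1) j = false then false
    else checkA d (r + 1) j
  else true
termination_by d.length - r

-- inner `for column in row` loop, j = column_nr
def innerA (d : List (List Bool)) (r : Nat) (row : List Bool) (j : Nat) : Bool :=
  match row with
  | [] => false
  | c :: rest => if c && checkA d r j then true else innerA d r rest (j + 1)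

-- outer `for row in data_2D_format` loop, r = row_nr
def outerA (d : List (List Bool)) (rows : List (List Bool)) (r : Nat) : Int :=
  match rows with
  | [] => -1
  | row :: rest =>
    if innerA d r row 0 then (d.length : Int) - (r : Int) else outerA d rest (r + 1)

def calc_highest_terain (data_2D_format : List (List Bool)) : Int :=
  outerA data_2D_format data_2D_format 0

-- ===== PORT B =====
-- the `while` loop: from row_nr = r downward, stop at start of the bottom-anchored run
def runB (d : List (List Bool)) (j : Nat) : Nat → Nat
  | 0 => 0
  | r + 1 => if pvCell d r j then runB d j r else r + 1

-- body of the `for column_nr in range(len(data_2D_format[-1]))` loop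
def stepB (d : List (List Bool)) (best : Option Nat) (j : Nat) : Option Nat :=
  if runB d j d.length < d.length then
    match best with
    | none => some (runB d j d.length)
    | some b => if runB d j d.length < b then some (runB d j d.length) else some b
  else best

def calc_highest_terain_alt (data_2D_format : List (List Bool)) : Int :=
  if data_2D_format.length = 0 then -1
  else
    match (List.range (data_2D_format.getD (data_2D_format.length - 1) []).length).foldl
        (stepB data_2D_format) none with
    | none => -1
    | some b => (data_2D_format.length : Int) - (b : Int)

-- ===== PRECONDITION & SPEC =====
-- Pre_ excludes exactly the inputs on which A raises IndexError: a True cell whose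
-- downward all-True path in its column falls off a shorter row, with no earlier
-- (row-major) fully anchored True cell at which A would already have returned.
-- pvRaisingAt d r j: cell (r,j) is True and A's downward check from it walks off a
-- shorter row before meeting the bottom or a False cell (check_if_highest raises).
def pvRaisingAt (d : List (List Bool)) (r j : Nat) : Bool :=
  pvCell d r j &&
    (List.range d.length).any fun r' =>
      decide (r < r') && decide ((d.getD r' []).length ≤ j) &&
        ((List.range r').all fun r'' => !(decide (r < r'')) || pvCell d r'' j)

-- pvAnchoredAt d ra ja: column ja is solid from row ra down to the bottom row.
def pvAnchoredAt (d : List (List Bool)) (ra ja : Nat) : Bool :=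
  (List.range d.length).all fun r' => !(decide (ra ≤ r')) || pvCell d r' ja

def Pre_calc_highest_terain (data_2D_format : List (List Bool)) : Prop :=
  ∀ r < data_2D_format.length, ∀ j < (data_2D_format.getD r []).length,
    pvRaisingAt data_2D_format r j = true →
    ∃ ra < data_2D_format.length, ∃ ja < (data_2D_format.getD ra []).length,
      (ra < r ∨ (ra = r ∧ ja < j)) ∧ pvAnchoredAt data_2D_format ra ja = true

instance (data_2D_format : List (List Bool)) : Decidable (Pre_calc_highest_terain data_2D_format) := by
  unfold Pre_calc_highest_terain; infer_instance

def pvWitness_calc_highest_terain : List (List Bool) := [[true]]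

def Spec_calc_highest_terain (data_2D_format : List (List Bool)) (out : Int) : Prop :=
  out = calc_highest_terain_alt data_2D_format
instance (data_2D_format : List (List Bool)) (out : Int) : Decidable (Spec_calc_highest_terain data_2D_format out) := by
  unfold Spec_calc_highest_terain; infer_instance

-- ===== CLAIM (what is proved, stated in full; the proofs are below) =====
def Claim_equal_calc_highest_terain : Prop := ∀ (data_2D_format : List (List Bool)), Dom_calc_highest_terain data_2D_format → Pre_calc_highest_terain data_2D_format → Spec_calc_highest_terain data_2D_format (calc_highest_terain data_2D_format)

-- ===== LEMMAS AND PROOFS =====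

-- anchAll d r j : column j is solid from row r down to the bottom
def anchAll (d : List (List Bool)) (r j : Nat) : Prop :=
  ∀ r', r ≤ r' → r' < d.length → pvCell d r' j = true

def RowQ (d : List (List Bool)) (r : Nat) : Prop := ∃ j, anchAll d r j

theorem checkA_eq_true (d : List (List Bool)) (j : Nat) :
    ∀ n r, d.length - r = n →
      (checkA d r j = true ↔ ∀ r', r < r' → r' < d.length → pvCell d r' j = true) := by
  intro n
  induction n with
  | zero =>
    intro r h
    rw [checkA]
    simp only [dif_neg (by omega : ¬ r + 1 < d.length)]
    constructor
    · intro _ r' h1 h2; omega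
    · intro _; trivial
  | succ n ih =>
    intro r h
    rw [checkA]
    by_cases hcase : r + 1 < d.length
    · simp only [dif_pos hcase]
      have ihr := ih (r + 1) (by omega)
      by_cases hc : pvCell d (r + 1) j = false
      · simp only [if_pos hc]
        constructor
        · intro hfalse; exact absurd hfalse (by simp)
        · intro hall
          have := hall (r + 1) (by omega) hcase
          rw [this] at hc; exact absurd hc (by simp)
      · simp only [if_neg hc]
        have hc' : pvCell d (r + 1) j = true := by simpa using hc
        rw [ihr]
        constructor
        · intro hall r' h1 h2
          rcases Nat.lt_or_ge (r + 1) r' with h3 | h3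
          · exact hall r' h3 h2
          · have : r' = r + 1 := by omega
            subst this; exact hc'
        · intro hall r' h1 h2; exact hall r' (by omega) h2
    · simp only [dif_neg hcase]
      constructor
      · intro _ r' h1 h2; omega
      · intro _; trivial

theorem innerA_eq_true (d : List (List Bool)) (r : Nat) :
    ∀ (row : List Bool) (j : Nat),
      (innerA d r row j = true ↔
        ∃ i, i < row.length ∧ row.getD i false = true ∧ checkA d r (j + i) = true) := by
  intro row
  induction row with
  | nil => intro j; simp [innerA]
  | cons c rest ih =>
    intro j
    rw [innerA]
    by_cases hc : (c && checkA d r j) = true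
    · simp only [if_pos hc]
      obtain ⟨hc1, hc2⟩ : c = true ∧ checkA d r j = true := by simpa using hc
      constructor
      · intro _
        exact ⟨0, by simp, by simpa using hc1, by simpa using hc2⟩
      · intro _; trivial
    · simp only [if_neg hc, ih (j + 1)]
      constructor
      · rintro ⟨i, h1, h2, h3⟩
        exact ⟨i + 1, by simpa using h1, by simpa using h2, by
          have : j + 1 + i = j + (i + 1) := by omega
          rwa [this] at h3⟩
      · rintro ⟨i, h1, h2, h3⟩
        match i with
        | 0 =>
          exfalso
          apply hc
          simp only [List.getD_cons_zero] at h2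
          simp only [Nat.add_zero] at h3
          rw [h2, h3]; rfl
        | i + 1 =>
          refine ⟨i, by simpa using h1, by simpa using h2, ?_⟩
          have : j + (i + 1) = j + 1 + i := by omega
          rwa [this] at h3

-- the inner loop over the actual row r decides RowQ (for r < length)
theorem innerA_rowQ (d : List (List Bool)) (r : Nat) (hr : r < d.length) :
    innerA d r (d.getD r []) 0 = true ↔ RowQ d r := by
  rw [innerA_eq_true]
  constructor
  · rintro ⟨i, h1, h2, h3⟩
    refine ⟨i, ?_⟩
    intro r' hle hlt
    rcases Nat.lt_or_ge r r' with h4 | h4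
    · exact (checkA_eq_true d i _ r rfl).mp (by simpa using h3) r' h4 hlt
    · have : r' = r := by omega
      subst this
      simpa [pvCell] using h2
  · rintro ⟨j, hj⟩
    have hcell : pvCell d r j = true := hj r (le_refl r) hr
    have hlen : j < (d.getD r []).length := by
      by_contra hge
      rw [pvCell, List.getD_eq_default _ _ (by omega)] at hcell
      exact absurd hcell (by simp)
    refine ⟨j, hlen, by simpa [pvCell] using hcell, ?_⟩
    simp only [Nat.zero_add]
    rw [checkA_eq_true d j _ r rfl]
    intro r' h1 h2; exact hj r' (by omega) h2

theorem outer_none (d : List (List Bool)) :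
    ∀ n r, d.length - r = n →
      (∀ r', r ≤ r' → r' < d.length → ¬ RowQ d r') →
      outerA d (d.drop r) r = -1 := by
  intro n
  induction n with
  | zero =>
    intro r h _
    rw [List.drop_eq_nil_of_le (by omega)]
    rfl
  | succ n ih =>
    intro r h hno
    have hr : r < d.length := by omega
    rw [List.drop_eq_getElem_cons hr]
    rw [outerA]
    have hget : d[r] = d.getD r [] := by
      rw [List.getD_eq_getElem d [] hr]
    rw [hget]
    have hin : ¬ innerA d r (d.getD r []) 0 = true :=
      fun hx => hno r (le_refl r) hr ((innerA_rowQ d r hr).mp hx)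
    rw [if_neg hin]
    exact ih (r + 1) (by omega) (fun r' h1 h2 => hno r' (by omega) h2)

theorem outer_found (d : List (List Bool)) :
    ∀ n r r0, d.length - r = n → r ≤ r0 → r0 < d.length → RowQ d r0 →
      (∀ r', r ≤ r' → r' < r0 → ¬ RowQ d r') →
      outerA d (d.drop r) r = (d.length : Int) - (r0 : Int) := by
  intro n
  induction n with
  | zero => intro r r0 h1 h2 h3 _ _; omega
  | succ n ih =>
    intro r r0 h1 h2 h3 hq hno
    have hr : r < d.length := by omega
    rw [List.drop_eq_getElem_cons hr, outerA]
    have hget : d[r] = d.getD r [] := by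
      rw [List.getD_eq_getElem d [] hr]
    rw [hget]
    by_cases heq : r = r0
    · subst heq
      rw [if_pos ((innerA_rowQ d r hr).mpr hq)]
    · have hlt : r < r0 := by omega
      have hin : ¬ innerA d r (d.getD r []) 0 = true :=
        fun hx => hno r (le_refl r) hlt ((innerA_rowQ d r hr).mp hx)
      rw [if_neg hin]
      exact ih (r + 1) r0 (by omega) (by omega) h3 hq
        (fun r' hx hy => hno r' (by omega) hy)

theorem runB_le (d : List (List Bool)) (j : Nat) : ∀ r, runB d j r ≤ r := by
  intro r
  induction r with
  | zero => simp [runB]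
  | succ r ih =>
    rw [runB]
    by_cases hc : pvCell d r j = true
    · simp only [if_pos hc]; omega
    · simp only [if_neg hc]; omega

theorem runB_run (d : List (List Bool)) (j : Nat) :
    ∀ r r', runB d j r ≤ r' → r' < r → pvCell d r' j = true := by
  intro r
  induction r with
  | zero => intro r' _ h; omega
  | succ r ih =>
    intro r' h1 h2
    rw [runB] at h1
    by_cases hc : pvCell d r j = true
    · simp only [if_pos hc] at h1
      rcases Nat.lt_or_ge r' r with h3 | h3
      · exact ih r' h1 h3
      · have : r' = r := by omega
        subst this; exact hc
    · simp only [if_neg hc] at h1; omega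

theorem runB_min (d : List (List Bool)) (j : Nat) :
    ∀ r t, (∀ r', t ≤ r' → r' < r → pvCell d r' j = true) → runB d j r ≤ t := by
  intro r
  induction r with
  | zero => intro t _; simp [runB]
  | succ r ih =>
    intro t hall
    rcases Nat.lt_or_ge r t with h1 | h1
    · calc runB d j (r + 1) ≤ r + 1 := runB_le d j (r + 1)
        _ ≤ t := by omega
    · have hc : pvCell d r j = true := hall r h1 (by omega)
      rw [runB]
      simp only [if_pos hc]
      exact ih t (fun r' hx hy => hall r' hx (by omega))

theorem fold_isSome (d : List (List Bool)) :
    ∀ (l : List Nat) (acc : Option Nat), acc.isSome →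
      (l.foldl (stepB d) acc).isSome := by
  intro l
  induction l with
  | nil => intro acc h; simpa using h
  | cons x xs ih =>
    intro acc h
    rw [List.foldl_cons]
    apply ih
    match acc with
    | some a =>
      simp only [stepB]
      by_cases hc : runB d x d.length < d.length
      · simp only [if_pos hc]
        by_cases h2 : runB d x d.length < a
        · simp [h2]
        · simp [h2]
      · simp [hc]
    | none => simp at h

theorem fold_exists (d : List (List Bool)) :
    ∀ (l : List Nat) (acc : Option Nat) (j : Nat), j ∈ l → runB d j d.length < d.length →
      (l.foldl (stepB d) acc).isSome := by
  intro l
  induction l with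
  | nil => intro acc j h; simp at h
  | cons x xs ih =>
    intro acc j hmem hlt
    rw [List.foldl_cons]
    rcases List.mem_cons.mp hmem with heq | hmem'
    · subst heq
      apply fold_isSome
      simp only [stepB, if_pos hlt]
      match acc with
      | none => simp
      | some a =>
        by_cases h2 : runB d j d.length < a
        · simp [h2]
        · simp [h2]
    · exact ih _ j hmem' hlt

theorem fold_some_mem (d : List (List Bool)) :
    ∀ (l : List Nat) (acc : Option Nat) (m : Nat),
      l.foldl (stepB d) acc = some m →
      acc = some m ∨ ∃ j ∈ l, runB d j d.length = m ∧ m < d.length := by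
  intro l
  induction l with
  | nil => intro acc m h; left; simpa using h
  | cons x xs ih =>
    intro acc m h
    rw [List.foldl_cons] at h
    rcases ih _ m h with hacc | ⟨j, hmem, hj⟩
    · simp only [stepB] at hacc
      by_cases hc : runB d x d.length < d.length
      · simp only [if_pos hc] at hacc
        match acc, hacc with
        | none, hacc =>
          simp only [Option.some.injEq] at hacc
          exact Or.inr ⟨x, by simp, hacc, hacc ▸ hc⟩
        | some a, hacc =>
          by_cases h2 : runB d x d.length < a
          · simp only [if_pos h2, Option.some.injEq] at hacc
            exact Or.inr ⟨x, by simp, hacc, hacc ▸ hc⟩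
          · simp only [if_neg h2, Option.some.injEq] at hacc
            exact Or.inl (by rw [hacc])
      · simp only [if_neg hc] at hacc
        exact Or.inl hacc
    · exact Or.inr ⟨j, by simp [hmem], hj⟩

theorem fold_some_le (d : List (List Bool)) :
    ∀ (l : List Nat) (acc : Option Nat) (m : Nat),
      l.foldl (stepB d) acc = some m →
      (∀ a, acc = some a → m ≤ a) ∧
      (∀ j ∈ l, runB d j d.length < d.length → m ≤ runB d j d.length) := by
  intro l
  induction l with
  | nil =>
    intro acc m h
    refine ⟨fun a ha => ?_, fun j hj => by simp at hj⟩
    simp only [List.foldl_nil] at h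
    rw [ha] at h
    simp only [Option.some.injEq] at h
    omega
  | cons x xs ih =>
    intro acc m h
    rw [List.foldl_cons] at h
    obtain ⟨ih1, ih2⟩ := ih _ m h
    have hstep : ∀ a, acc = some a →
        m ≤ a ∧ (runB d x d.length < d.length → m ≤ runB d x d.length) := by
      intro a ha
      subst ha
      simp only [stepB] at ih1
      by_cases hc : runB d x d.length < d.length
      · simp only [if_pos hc] at ih1
        by_cases h2 : runB d x d.length < a
        · have := ih1 (runB d x d.length) (by rw [if_pos h2])
          exact ⟨by omega, fun _ => this⟩
        · have := ih1 a (by rw [if_neg h2])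
          exact ⟨this, fun _ => by omega⟩
      · simp only [if_neg hc] at ih1
        exact ⟨ih1 a rfl, fun hcc => absurd hcc hc⟩
    constructor
    · intro a ha; exact (hstep a ha).1
    · intro j hj hjlt
      rcases List.mem_cons.mp hj with heq | hmem
      · subst heq
        match acc with
        | some a => exact (hstep a rfl).2 hjlt
        | none =>
          simp only [stepB, if_pos hjlt] at ih1
          exact ih1 _ rfl
      · exact ih2 j hmem hjlt

-- ===== VERDICT (by name: the statement is the Claim_ definition above) =====
theorem calc_highest_terain_spec : Claim_equal_calc_highest_terain := by
  intro d _ _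
  unfold Spec_calc_highest_terain calc_highest_terain calc_highest_terain_alt
  by_cases hR : d.length = 0
  · have hnil : d = [] := List.eq_nil_of_length_eq_zero hR
    subst hnil
    rfl
  · simp only [if_neg hR]
    set C := (d.getD (d.length - 1) []).length with hC
    by_cases hA : ∃ r0, r0 < d.length ∧ RowQ d r0
    · haveI : DecidablePred (fun r => r < d.length ∧ RowQ d r) := fun _ => Classical.dec _
      set r0 := Nat.find hA with hr0def
      obtain ⟨hr0lt, hr0q⟩ := Nat.find_spec hA
      have hmin : ∀ r, r < r0 → ¬ (r < d.length ∧ RowQ d r) := fun r hr => Nat.find_min hA hr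
      -- A's side
      have hAval : outerA d d 0 = (d.length : Int) - (r0 : Int) := by
        have := outer_found d d.length 0 r0 (by omega) (by omega) hr0lt hr0q
          (fun r' _ hy => fun hq => hmin r' hy ⟨by omega, hq⟩)
        simpa using this
      rw [hAval]
      -- B's side
      obtain ⟨j0, hj0⟩ := hr0q
      have htop0 : runB d j0 d.length ≤ r0 := runB_min d j0 d.length r0 hj0
      have htop0lt : runB d j0 d.length < d.length := by omega
      have hj0C : j0 < C := by
        have hcell : pvCell d (d.length - 1) j0 = true := hj0 (d.length - 1) (by omega) (by omega)
        by_contra hge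
        rw [pvCell, List.getD_eq_default _ _ (by omega)] at hcell
        exact absurd hcell (by simp)
      have hsome := fold_exists d (List.range C) none j0 (List.mem_range.mpr hj0C) htop0lt
      obtain ⟨m, hm⟩ := Option.isSome_iff_exists.mp hsome
      rw [hm]
      rcases fold_some_mem d (List.range C) none m hm with habs | ⟨jm, _, hjm, hmlt⟩
      · simp at habs
      · have hmq : RowQ d m :=
          ⟨jm, fun r' h1 h2 => runB_run d jm d.length r' (hjm ▸ h1) h2⟩
        have hge : r0 ≤ m := by
          by_contra hlt
          exact hmin m (by omega) ⟨hmlt, hmq⟩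
        have hle : m ≤ r0 := by
          have := (fold_some_le d (List.range C) none m hm).2 j0
            (List.mem_range.mpr hj0C) htop0lt
          omega
        have : m = r0 := by omega
        subst this
        rfl
    · push Not at hA
      have hAval : outerA d d 0 = -1 := by
        have := outer_none d d.length 0 (by omega) (fun r' _ h2 => hA r' h2)
        simpa using this
      rw [hAval]
      have hnone : (List.range C).foldl (stepB d) none = none := by
        have key : ∀ (l : List Nat), (∀ j ∈ l, ¬ runB d j d.length < d.length) →
            l.foldl (stepB d) none = none := by
          intro l
          induction l with
          | nil => intro _; rfl
          | cons x xs ih =>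
            intro hno
            rw [List.foldl_cons]
            simp only [stepB, if_neg (hno x (by simp))]
            exact ih (fun j hj => hno j (by simp [hj]))
        apply key
        intro j _ hlt
        exact hA (runB d j d.length) hlt
          ⟨j, fun r' h1 h2 => runB_run d j d.length r' h1 h2⟩
      rw [hnone]
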